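-- pv_equiv track=rewrite | github.com/nicogodet/custom-osgeo4w-qgis | qgis-isl/apps/qgis-ltr/python/plugins/isl_box/algorithm/acb_amc/pre_traitement_sirene.py | reorder_items
-- ===== SOURCE A (Python) =====
-- def reorder_items(d, keys):
--     d = d.copy()  # we're going to destructively modify d, so make a copy first
--     result = {}
--     for key in keys:
--         if key in d:
--             result[key] = d.pop(key)
--     # the user might not have supplied all the keys belonging to d,
--     # so insert anything we haven't touched yet
--     result.update(d)
--     return result
-- ===== SOURCE B (Python) =====
-- def reorder_items(d, keys):
--     # Non-destructive: ordered prefix by comprehension, then leftovers by membership test.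
--     result = {k: d[k] for k in keys if k in d}
--     for k in d:
--         if k not in result:
--             result[k] = d[k]
--     return result
-- ===== Notes on version B (the rewrite author's own statement) =====
-- stated objective: simpler
-- what changed: B builds the result non-destructively: a dict comprehension picks the keys of d in the requested order, then one pass over d appends the leftovers by a membership test against the partially built result, replacing A's copy-then-pop-and-update strategy that maintains and empties a shrinking copy of d.
import Mathlib
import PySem

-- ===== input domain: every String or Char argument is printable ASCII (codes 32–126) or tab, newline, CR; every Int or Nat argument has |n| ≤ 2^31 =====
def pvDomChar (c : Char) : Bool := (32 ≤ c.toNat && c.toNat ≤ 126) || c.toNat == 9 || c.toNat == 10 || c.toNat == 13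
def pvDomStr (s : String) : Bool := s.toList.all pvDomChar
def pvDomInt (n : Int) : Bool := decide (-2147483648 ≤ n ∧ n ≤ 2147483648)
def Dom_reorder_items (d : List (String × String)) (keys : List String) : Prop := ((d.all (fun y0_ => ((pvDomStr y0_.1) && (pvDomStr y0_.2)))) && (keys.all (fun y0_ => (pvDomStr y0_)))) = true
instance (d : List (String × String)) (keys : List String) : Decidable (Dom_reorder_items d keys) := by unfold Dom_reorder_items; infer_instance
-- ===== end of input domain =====

-- B replaces A's destructive copy-pop-and-update strategy with a non-destructive build
-- (ordered prefix, then leftovers by membership test); objective: simpler. Neither mutates its argument.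

-- ===== PORT A =====
def reorder_items (d : List (String × String)) (keys : List String) : List (String × String) :=
  -- d = d.copy()  (the dict built from the input pairs, copied)
  let dcopy : PySem.Dict String String := PySem.Dict.ofList d
  -- result = {};  for key in keys: if key in d: result[key] = d.pop(key)
  let st := keys.foldl
    (fun (st : PySem.Dict String String × PySem.Dict String String) key =>
      if st.2.contains key then
        match st.2.pop? key with
        | some (v, d') => (st.1.insert key v, d')
        | none => st      -- unreachable: pop is guarded by `key in d`
      else st)
    (PySem.Dict.empty, dcopy)
  -- result.update(d);  return result
  (st.1.update st.2.items).items

-- ===== PORT B =====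
def reorder_items_alt (d : List (String × String)) (keys : List String) : List (String × String) :=
  let dd : PySem.Dict String String := PySem.Dict.ofList d
  -- result = {k: d[k] for k in keys if k in d}   (d[k] guarded by `k in d`, so getD's default is never used)
  let result := keys.foldl
    (fun r k => if dd.contains k then r.insert k (dd.getD k "") else r)
    (PySem.Dict.empty : PySem.Dict String String)
  -- for k in d: if k not in result: result[k] = d[k]
  (dd.keys.foldl (fun r k => if r.contains k then r else r.insert k (dd.getD k "")) result).items

-- ===== PRECONDITION & SPEC =====
def Spec_reorder_items (d : List (String × String)) (keys : List String) (out : List (String × String)) : Prop := out = reorder_items_alt d keys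
instance (d : List (String × String)) (keys : List String) (out : List (String × String)) : Decidable (Spec_reorder_items d keys out) := by unfold Spec_reorder_items; infer_instance

-- ===== CLAIM (what is proved, stated in full; the proofs are below) =====
def Claim_equal_reorder_items : Prop := ∀ (d : List (String × String)) (keys : List String), Dom_reorder_items d keys → Spec_reorder_items d keys (reorder_items d keys)

-- ===== LEMMAS AND PROOFS =====

-- `dd` restricted to the keys NOT yet moved into `r` (A's shrinking copy, expressed from B's state)
def pvRestrict (dd r : PySem.Dict String String) : PySem.Dict String String :=
  PySem.Dict.mk (dd.items.filter (fun p => !r.contains p.1))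

lemma pvContains_restrict (dd r : PySem.Dict String String) (k : String) :
    (pvRestrict dd r).contains k = (dd.contains k && !r.contains k) := by
  simp only [pvRestrict, PySem.Dict.contains, List.any_filter]
  induction dd.items with
  | nil => simp
  | cons p l ih =>
    simp only [List.any_cons, ih]
    by_cases h : p.1 = k
    · subst h; by_cases hr : r.contains p.1 <;> simp
    · have : (p.1 == k) = false := by simp [h]
      simp [this]

lemma pvGet?_restrict (dd r : PySem.Dict String String) (k : String)
    (hrk : r.contains k = false) : (pvRestrict dd r).get? k = dd.get? k := by
  simp only [pvRestrict, PySem.Dict.get?]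
  congr 1
  induction dd.items with
  | nil => rfl
  | cons p l ih =>
    by_cases h : p.1 = k
    · subst h; simp [hrk]
    · have hb : (p.1 == k) = false := by simp [h]
      by_cases hc : r.contains p.1 = true <;>
        simp [hc, hb, ih]

lemma pvErase_restrict (dd r : PySem.Dict String String) (k : String) (v : String) :
    (pvRestrict dd r).erase k = pvRestrict dd (r.insert k v) := by
  simp only [pvRestrict, PySem.Dict.erase, List.filter_filter]
  congr 1
  apply List.filter_congr
  intro p _
  simp [PySem.Dict.contains_insert]

lemma pvInsert_same (r : PySem.Dict String String) (k v : String)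
    (hnd : r.keys.Nodup) (hget : r.get? k = some v) : r.insert k v = r := by
  have hc : r.contains k = true := by
    rw [PySem.Dict.contains_eq_isSome_get?, hget]; rfl
  apply PySem.Dict.ext
  rw [PySem.Dict.items_insert_of_contains r v hc]
  have : ∀ p ∈ r.items, (if (p.1 == k) = true then (k, v) else p) = p := by
    intro p hp
    by_cases h : p.1 = k
    · have hpv : r.get? k = some p.2 := by
        have := PySem.Dict.get?_of_mem_items r (k := p.1) (v := p.2) (by simpa using hp) hnd
        rwa [h] at this
      have hv2 : v = p.2 := Option.some_inj.mp (hget.symm.trans hpv)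
      rw [if_pos (by simp [h]), hv2, ← h]
    · simp [h]
  rw [List.map_congr_left this, List.map_id']

-- Phase 1: A's pop loop over `keys`, started from (r, dd минус r), lands on B's comprehension fold.
lemma pvPhase1 (dd : PySem.Dict String String) (keys : List String)
    (r : PySem.Dict String String) (hnd : r.keys.Nodup)
    (hr : ∀ k v, r.get? k = some v → dd.get? k = some v) :
    keys.foldl
      (fun (st : PySem.Dict String String × PySem.Dict String String) key =>
        if st.2.contains key then
          match st.2.pop? key with
          | some (v, d') => (st.1.insert key v, d')
          | none => st
        else st)
      (r, pvRestrict dd r)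
    = (keys.foldl (fun r k => if dd.contains k then r.insert k (dd.getD k "") else r) r,
       pvRestrict dd
         (keys.foldl (fun r k => if dd.contains k then r.insert k (dd.getD k "") else r) r)) := by
  induction keys generalizing r with
  | nil => rfl
  | cons k ks ih =>
    simp only [List.foldl_cons]
    by_cases hdk : dd.contains k = true
    · by_cases hrk : r.contains k = true
      · -- already moved: A's remaining copy lacks k; B re-inserts the identical pair
        have hres : (pvRestrict dd r).contains k = false := by
          rw [pvContains_restrict]; simp [hrk]
        obtain ⟨w, hw⟩ : ∃ w, r.get? k = some w := by
          rw [PySem.Dict.contains_eq_isSome_get?] at hrk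
          exact Option.isSome_iff_exists.mp hrk
        have hdw : dd.get? k = some w := hr k w hw
        have hgd : dd.getD k "" = w := by simp [PySem.Dict.getD, hdw]
        have hins : r.insert k (dd.getD k "") = r := by
          rw [hgd]; exact pvInsert_same r k w hnd hw
        rw [hres, if_neg (by simp), if_pos hdk, hins]
        exact ih r hnd hr
      · -- genuinely moved now
        have hrk' : r.contains k = false := by simpa using hrk
        have hres : (pvRestrict dd r).contains k = true := by
          rw [pvContains_restrict]; simp [hdk, hrk']
        obtain ⟨v, hv⟩ : ∃ v, dd.get? k = some v := by
          rw [PySem.Dict.contains_eq_isSome_get?] at hdk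
          exact Option.isSome_iff_exists.mp hdk
        have hget : (pvRestrict dd r).get? k = some v := by
          rw [pvGet?_restrict dd r k hrk', hv]
        have hgd : dd.getD k "" = v := by simp [PySem.Dict.getD, hv]
        rw [if_pos hres, if_pos hdk]
        simp only [PySem.Dict.pop?, hget, Option.map_some]
        rw [pvErase_restrict dd r k v, hgd]
        refine ih (r.insert k v) (PySem.Dict.nodup_keys_insert _ _ _ hnd) ?_
        intro k' v' h
        rw [PySem.Dict.get?_insert] at h
        by_cases hk : k' = k
        · subst hk; rw [if_pos rfl] at h; rw [← Option.some_inj.mp h]; exact hv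
        · rw [if_neg hk] at h; exact hr k' v' h
    · -- k not in d: both sides skip
      have hdk' : dd.contains k = false := by simpa using hdk
      have hres : (pvRestrict dd r).contains k = false := by
        rw [pvContains_restrict]; simp [hdk']
      rw [hres, if_neg (by simp), hdk', if_neg (by simp)]
      exact ih r hnd hr

-- Phase 2: `result.update(remaining)` equals B's second loop over d's keys with a membership test.
lemma pvPhase2 (dd : PySem.Dict String String) (l : List (String × String))
    (hl : ∀ p ∈ l, dd.getD p.1 "" = p.2) (hnd : (l.map Prod.fst).Nodup)
    (r : PySem.Dict String String) :
    r.update (l.filter (fun p => !r.contains p.1))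
    = (l.map Prod.fst).foldl
        (fun r k => if r.contains k then r else r.insert k (dd.getD k "")) r := by
  induction l generalizing r with
  | nil => rfl
  | cons p l ih =>
    simp only [List.map_cons, List.foldl_cons, List.filter_cons]
    by_cases hc : r.contains p.1 = true
    · rw [if_pos hc, show (!r.contains p.1) = false by simp [hc]]
      simp only [Bool.false_eq_true, if_false]
      exact ih (fun q hq => hl q (List.mem_cons_of_mem _ hq)) (List.nodup_cons.mp hnd).2 r
    · have hc' : r.contains p.1 = false := by simpa using hc
      have hv : dd.getD p.1 "" = p.2 := hl p (List.mem_cons_self ..)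
      have hfilter : l.filter (fun q => !r.contains q.1)
          = l.filter (fun q => !(r.insert p.1 p.2).contains q.1) := by
        apply List.filter_congr
        intro q hq
        have hne : (q.1 == p.1) = false := by
          have : q.1 ≠ p.1 := by
            intro h
            exact (List.nodup_cons.mp hnd).1 (h ▸ List.mem_map_of_mem hq)
          simp [this]
        rw [PySem.Dict.contains_insert, hne, Bool.false_or]
      have hb : (!r.contains p.1) = true := by simp [hc']
      rw [hb, if_pos rfl, if_neg (show ¬ r.contains p.1 = true by simp [hc']), hv]
      show (r.insert p.1 p.2).update (l.filter fun q => !r.contains q.1) = _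
      rw [hfilter]
      exact ih (fun q hq => hl q (List.mem_cons_of_mem _ hq)) (List.nodup_cons.mp hnd).2
        (r.insert p.1 p.2)

lemma pvRestrict_empty (dd : PySem.Dict String String) :
    pvRestrict dd PySem.Dict.empty = dd := by
  apply PySem.Dict.ext
  simp [pvRestrict, PySem.Dict.contains_empty]

-- ===== VERDICT (by name: the statement is the Claim_ definition above) =====
theorem reorder_items_spec : Claim_equal_reorder_items := by
  intro d keys _
  unfold Spec_reorder_items
  simp only [reorder_items, reorder_items_alt]
  set dd : PySem.Dict String String := PySem.Dict.ofList d with hdd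
  have hnd : dd.keys.Nodup := PySem.Dict.nodup_keys_ofList d
  have h1 := pvPhase1 dd keys PySem.Dict.empty
    (by simp [PySem.Dict.keys_empty])
    (by intro k v h; rw [PySem.Dict.get?_empty] at h; exact absurd h (by simp))
  rw [pvRestrict_empty] at h1
  rw [h1]
  congr 1
  have hl : ∀ p ∈ dd.items, dd.getD p.1 "" = p.2 := by
    intro p hp
    exact PySem.Dict.getD_of_mem_items dd (by simpa using hp) hnd ""
  have h2 := pvPhase2 dd dd.items hl (by simpa [PySem.Dict.keys] using hnd)
    (keys.foldl (fun r k => if dd.contains k then r.insert k (dd.getD k "") else r)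
      PySem.Dict.empty)
  simpa [pvRestrict, PySem.Dict.keys] using h2
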